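-- pv_equiv track=rewrite | github.com/H04ka/september | Untitled-1.py | calculate_compability
-- ===== SOURCE A (Python) =====
-- def calculate_compability(name1, name2):
--     name1 = name1.lower().replace(" ", "")
--     name2 = name2.lower().replace(" ", "")
--
--     combined_name = name1 + name2
--
--     letter_count = {}
--     for letter in combined_name:
--         if letter in letter_count:
--             letter_count[letter] += 1
--         else:
--             letter_count[letter] = 1
--
--     compatibility_score = sum(letter_count.values()) %100
--
--     return compatibility_score
-- ===== SOURCE B (Python) =====
-- def calculate_compability(name1, name2):
--     name1 = name1.lower().replace(" ", "")
--     name2 = name2.lower().replace(" ", "")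
--     return (len(name1) + len(name2)) % 100
-- ===== Notes on version B (the rewrite author's own statement) =====
-- stated objective: simpler
-- what changed: B drops the frequency dictionary and counting loop entirely: the sum of per-letter counts equals the length of the combined normalized string, so B returns (len(name1)+len(name2)) % 100 after the same lower()/replace normalization.
import Mathlib
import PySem

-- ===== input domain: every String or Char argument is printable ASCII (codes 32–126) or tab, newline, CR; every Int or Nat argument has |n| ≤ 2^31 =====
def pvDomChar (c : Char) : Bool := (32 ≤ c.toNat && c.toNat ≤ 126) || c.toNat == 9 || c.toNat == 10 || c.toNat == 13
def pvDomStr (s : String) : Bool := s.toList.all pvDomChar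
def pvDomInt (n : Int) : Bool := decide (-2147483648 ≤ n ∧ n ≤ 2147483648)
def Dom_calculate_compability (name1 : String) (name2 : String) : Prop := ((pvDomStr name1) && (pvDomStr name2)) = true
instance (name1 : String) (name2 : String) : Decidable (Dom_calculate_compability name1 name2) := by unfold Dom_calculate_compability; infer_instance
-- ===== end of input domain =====

-- B replaces A's per-letter frequency dictionary by the observation that the sum of the
-- counts is just the length of the combined normalized string (simpler; same normalization).

-- ===== PORT A =====
def calculate_compability (name1 : String) (name2 : String) : Int :=
  let n1 := PySem.Str.replace (PySem.Str.lower name1) " " ""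
  let n2 := PySem.Str.replace (PySem.Str.lower name2) " " ""
  let combined := n1 ++ n2
  let letter_count := combined.toList.foldl
    (fun (d : PySem.Dict Char Int) letter =>
      if d.contains letter then d.insert letter (d.getD letter 0 + 1)
      else d.insert letter 1)
    PySem.Dict.empty
  PySem.Int.mod letter_count.values.sum 100

-- ===== PORT B =====
def calculate_compability_alt (name1 : String) (name2 : String) : Int :=
  let n1 := PySem.Str.replace (PySem.Str.lower name1) " " ""
  let n2 := PySem.Str.replace (PySem.Str.lower name2) " " ""
  PySem.Int.mod ((n1.toList.length : Int) + (n2.toList.length : Int)) 100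

-- ===== PRECONDITION & SPEC =====
def Spec_calculate_compability (name1 : String) (name2 : String) (out : Int) : Prop := out = calculate_compability_alt name1 name2
instance (name1 : String) (name2 : String) (out : Int) : Decidable (Spec_calculate_compability name1 name2 out) := by unfold Spec_calculate_compability; infer_instance

-- ===== CLAIM (what is proved, stated in full; the proofs are below) =====
def Claim_equal_calculate_compability : Prop := ∀ (name1 : String) (name2 : String), Dom_calculate_compability name1 name2 → Spec_calculate_compability name1 name2 (calculate_compability name1 name2)

-- ===== LEMMAS AND PROOFS =====

-- A's counting step is exactly the 'insert (getD + 1)' step (when the key is absent, getD = 0).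
lemma count_step_eq (d : PySem.Dict Char Int) (c : Char) :
    (if d.contains c then d.insert c (d.getD c 0 + 1) else d.insert c 1)
      = d.insert c (d.getD c 0 + 1) := by
  by_cases h : d.contains c = true
  · simp [h]
  · have hgd : d.getD c 0 = 0 :=
      PySem.Dict.getD_of_not_contains d 0 (by simpa using h)
    simp [h, hgd]

-- The sum of the values of Counter(l) is l.length.
lemma sum_values_counter (l : List Char) :
    (PySem.Dict.counter l : PySem.Dict Char Int).values.sum = (l.length : Int) := by
  have hitems := PySem.Dict.items_counter (κ := Char) l
  have hval : (PySem.Dict.counter l : PySem.Dict Char Int).values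
      = (PySem.Set.ofList l).map (fun k => (l.count k : Int)) := by
    simp only [PySem.Dict.values, hitems, List.map_map]
    rfl
  rw [hval]
  have hperm : List.Perm (PySem.Set.ofList l) l.dedup := by
    rw [List.perm_ext_iff_of_nodup (PySem.Set.nodup_ofList l) l.nodup_dedup]
    intro a
    simp [PySem.Set.mem_ofList, List.mem_dedup]
  have := (hperm.map (fun k => (l.count k : Int))).sum_eq
  rw [this]
  have hnat : (l.dedup.map (fun k => l.count k)).sum = l.length :=
    l.sum_map_count_dedup_eq_length
  have : (l.dedup.map (fun k => (l.count k : Int))).sum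
      = ((l.dedup.map (fun k => l.count k)).sum : Int) := by
    induction l.dedup with
    | nil => simp
    | cons x t ih => simp [ih]
  rw [this, hnat]

theorem calculate_compability_spec' (name1 name2 : String) :
    calculate_compability name1 name2 = calculate_compability_alt name1 name2 := by
  have key : ∀ l : List Char,
      (l.foldl (fun (d : PySem.Dict Char Int) letter =>
        if d.contains letter then d.insert letter (d.getD letter 0 + 1)
        else d.insert letter 1) PySem.Dict.empty).values.sum = (l.length : Int) := by
    intro l
    have h1 := PySem.List.foldl_congr_mem l
        (fun (d : PySem.Dict Char Int) letter =>
          if d.contains letter then d.insert letter (d.getD letter 0 + 1)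
          else d.insert letter 1)
        (fun (d : PySem.Dict Char Int) letter =>
          d.insert letter (d.getD letter 0 + 1))
        PySem.Dict.empty
        (fun acc x _ => count_step_eq acc x)
    rw [h1, PySem.Dict.foldl_insert_getD_add_one_eq_counter, sum_values_counter]
  simp only [calculate_compability, calculate_compability_alt, key,
    String.toList_append, List.length_append, Nat.cast_add]

-- ===== VERDICT (by name: the statement is the Claim_ definition above) =====
theorem calculate_compability_spec : Claim_equal_calculate_compability := by
  intro name1 name2 _
  exact calculate_compability_spec' name1 name2
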